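-- pv_equiv track=rewrite | github.com/alyoook3000/ProjectEulerAttempts | LargestPF.py | LargestPF
-- ===== SOURCE A (Python) =====
-- def LargestPF(n):
--     Factors = []
--     PrimeFactors = []
--     for i in range(1, n+1):
--         if n % i == 0:
--             Factors.append(i)
--     for x in Factors:
--         if (x%3 == 0) or (x%5 == 0) or (x%7 == 0) or (x%11 == 0):
--             PrimeFactors.append(x)
--
--     return max(PrimeFactors)
-- ===== SOURCE B (Python) =====
-- def LargestPF(n):
--     candidates = []
--     i = 1
--     while i * i <= n:
--         if n % i == 0:
--             for d in (i, n // i):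
--                 if d % 3 == 0 or d % 5 == 0 or d % 7 == 0 or d % 11 == 0:
--                     candidates.append(d)
--         i += 1
--     return max(candidates)
-- ===== Notes on version B (the rewrite author's own statement) =====
-- stated objective: faster
-- what changed: Enumerates divisors in pairs (i, n//i) only up to sqrt(n), filtering by divisibility by 3/5/7/11 as it goes, instead of scanning all n candidates; Pre_ excludes the inputs (n < 1 or n not divisible by 3, 5, 7 or 11) on which A raises ValueError from max() of an empty list, where B likewise raises.
import Mathlib
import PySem

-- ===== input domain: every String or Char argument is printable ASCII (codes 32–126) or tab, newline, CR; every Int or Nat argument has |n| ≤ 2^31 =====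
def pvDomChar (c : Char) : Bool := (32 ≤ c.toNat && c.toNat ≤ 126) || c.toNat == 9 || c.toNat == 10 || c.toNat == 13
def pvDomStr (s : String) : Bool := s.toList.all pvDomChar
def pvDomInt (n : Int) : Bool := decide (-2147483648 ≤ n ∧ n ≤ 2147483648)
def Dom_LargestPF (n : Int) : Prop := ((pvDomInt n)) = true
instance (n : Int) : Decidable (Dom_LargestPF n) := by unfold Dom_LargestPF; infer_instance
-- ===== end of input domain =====

-- B enumerates divisor pairs (i, n//i) only up to sqrt(n) instead of scanning 1..n (faster, asymptotic).

-- ===== PORT A =====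
def LargestPF (n : Int) : Int :=
  let factors : List Int :=
    (PySem.List.pyRange 1 (n + 1) 1).foldl
      (fun acc i => if PySem.Int.mod n i = 0 then acc ++ [i] else acc) []
  let primeFactors : List Int :=
    factors.foldl
      (fun acc x =>
        if PySem.Int.mod x 3 = 0 ∨ PySem.Int.mod x 5 = 0 ∨ PySem.Int.mod x 7 = 0 ∨
            PySem.Int.mod x 11 = 0 then acc ++ [x] else acc) []
  -- max(PrimeFactors); Python raises ValueError on the empty list, excluded by Pre_
  (PySem.List.max? primeFactors (fun y => y)).getD 0

-- ===== PORT B =====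
-- the inner 'for d in (i, n//i): if …: candidates.append(d)'
def pfInner (acc : List Int) (d : Int) : List Int :=
  if PySem.Int.mod d 3 = 0 ∨ PySem.Int.mod d 5 = 0 ∨ PySem.Int.mod d 7 = 0 ∨
      PySem.Int.mod d 11 = 0 then acc ++ [d] else acc

-- the 'while i * i <= n' loop over candidates
def pfLoop (n i : Int) (acc : List Int) : List Int :=
  if i * i ≤ n then
    pfLoop n (i + 1)
      (if PySem.Int.mod n i = 0 then
        ([i, PySem.Int.floordiv n i]).foldl pfInner acc
       else acc)
  else acc
termination_by (n + 1 - i).toNat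
decreasing_by
  rename_i h
  have hii : i ≤ i * i := by nlinarith [sq_nonneg (i - 1), sq_nonneg i]
  omega

def LargestPF_alt (n : Int) : Int :=
  -- max(candidates); Python raises ValueError on the empty list, excluded by Pre_
  (PySem.List.max? (pfLoop n 1 []) (fun y => y)).getD 0

-- ===== PRECONDITION & SPEC =====
-- Pre_ excludes exactly the inputs on which A raises ValueError (max of an empty list):
-- n < 1, or n not divisible by any of 3, 5, 7, 11.  (B raises the same ValueError there.)
def Pre_LargestPF (n : Int) : Prop :=
  1 ≤ n ∧ (PySem.Int.mod n 3 = 0 ∨ PySem.Int.mod n 5 = 0 ∨ PySem.Int.mod n 7 = 0 ∨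
    PySem.Int.mod n 11 = 0)
instance (n : Int) : Decidable (Pre_LargestPF n) := by unfold Pre_LargestPF; infer_instance
def pvWitness_LargestPF : Int := (15)

def Spec_LargestPF (n : Int) (out : Int) : Prop := out = LargestPF_alt n
instance (n : Int) (out : Int) : Decidable (Spec_LargestPF n out) := by unfold Spec_LargestPF; infer_instance

-- ===== CLAIM =====
def Claim_equal_LargestPF : Prop := ∀ (n : Int), Dom_LargestPF n → Pre_LargestPF n → Spec_LargestPF n (LargestPF n)

-- ===== LEMMAS AND PROOFS =====

-- Both sides equal n under Pre_: n is the largest member of each list.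

theorem LargestPF_of_pre (n : Int) (h : Pre_LargestPF n) : LargestPF n = n := by
  obtain ⟨h1, h2⟩ := h
  unfold LargestPF
  have e1 : (fun (acc : List Int) i => if PySem.Int.mod n i = 0 then acc ++ [i] else acc)
      = (fun acc i => if (fun j => decide (PySem.Int.mod n j = 0)) i = true
          then acc ++ [(fun x => x) i] else acc) := by
    funext acc i; simp
  have e2 : (fun (acc : List Int) x =>
        if PySem.Int.mod x 3 = 0 ∨ PySem.Int.mod x 5 = 0 ∨ PySem.Int.mod x 7 = 0 ∨
            PySem.Int.mod x 11 = 0 then acc ++ [x] else acc)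
      = (fun acc x => if (fun y => decide (PySem.Int.mod y 3 = 0 ∨ PySem.Int.mod y 5 = 0 ∨
            PySem.Int.mod y 7 = 0 ∨ PySem.Int.mod y 11 = 0)) x = true
          then acc ++ [(fun y => y) x] else acc) := by
    funext acc x; simp
  simp only [e1, e2, PySem.List.foldl_append_if]
  simp only [List.nil_append, List.map_id_fun', id]
  set pf := (((PySem.List.pyRange 1 (n + 1) 1).filter
      (fun j => decide (PySem.Int.mod n j = 0))).filter
      (fun y => decide (PySem.Int.mod y 3 = 0 ∨ PySem.Int.mod y 5 = 0 ∨
        PySem.Int.mod y 7 = 0 ∨ PySem.Int.mod y 11 = 0))) with hpf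
  have hn_mem : n ∈ pf := by
    rw [hpf]
    simp only [List.mem_filter, decide_eq_true_eq]
    refine ⟨⟨?_, ?_⟩, h2⟩
    · rw [PySem.List.mem_pyRange_one]; omega
    · rw [PySem.Int.mod_eq_zero_iff_dvd]
  have hub : ∀ x ∈ pf, x ≤ n := by
    intro x hx
    rw [hpf] at hx
    simp only [List.mem_filter] at hx
    obtain ⟨⟨hy, _⟩, _⟩ := hx
    rw [PySem.List.mem_pyRange_one] at hy
    omega
  obtain ⟨m, hm⟩ : ∃ m, PySem.List.max? pf (fun y => y) = some m := by
    cases hmx : PySem.List.max? pf (fun y => y) with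
    | some m => exact ⟨m, rfl⟩
    | none =>
      rw [PySem.List.max?_eq_none_iff] at hmx
      rw [hmx] at hn_mem
      simp at hn_mem
  rw [hm, Option.getD_some]
  have h3 := PySem.List.max?_mem hm
  have h4 := PySem.List.max?_isMax hm n hn_mem
  have h5 := hub m h3
  omega

-- pfLoop only appends to acc
theorem pfLoop_mono (n i : Int) (acc : List Int) : ∀ x ∈ acc, x ∈ pfLoop n i acc := by
  induction i, acc using pfLoop.induct n with
  | case1 i acc h ih =>
    intro x hx
    rw [pfLoop, if_pos h]
    apply ih
    split
    · simp only [List.foldl, pfInner]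
      split <;> split <;> simp [hx]
    · exact hx
  | case2 i acc h =>
    intro x hx
    rw [pfLoop, if_neg h]
    exact hx

-- every element of pfLoop's result is ≤ n (given 1 ≤ i, 1 ≤ n and the invariant on acc)
theorem pfLoop_le (n i : Int) (acc : List Int) (hi : 1 ≤ i) (hn : 1 ≤ n)
    (hacc : ∀ x ∈ acc, x ≤ n) : ∀ x ∈ pfLoop n i acc, x ≤ n := by
  induction i, acc using pfLoop.induct n with
  | case1 i acc h ih =>
    intro x hx
    rw [pfLoop, if_pos h] at hx
    have hiln : i ≤ n := by nlinarith
    have hfd : PySem.Int.floordiv n i ≤ n := by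
      rw [PySem.Int.floordiv_eq_ediv_of_pos (by omega)]
      exact Int.ediv_le_self i (by omega)
    refine ih (by omega) ?_ x hx
    split
    · intro y hy
      simp only [List.foldl, pfInner] at hy
      have : y ∈ acc ∨ y = i ∨ y = PySem.Int.floordiv n i := by
        split at hy <;> split at hy <;>
          (try simp only [List.mem_append, List.mem_cons, List.not_mem_nil] at hy) <;> tauto
      rcases this with hy' | hy' | hy'
      · exact hacc y hy'
      · omega
      · omega
    · exact hacc
  | case2 i acc h =>
    intro x hx
    rw [pfLoop, if_neg h] at hx
    exact hacc x hx

theorem mod_one_self (n : Int) : PySem.Int.mod n 1 = 0 := by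
  rw [PySem.Int.mod_eq_zero_iff_dvd]; exact one_dvd n

theorem floordiv_one_self (n : Int) : PySem.Int.floordiv n 1 = n := by
  rw [PySem.Int.floordiv_eq_ediv_of_pos (by omega)]; simp

theorem n_mem_pfLoop (n : Int) (h : Pre_LargestPF n) : n ∈ pfLoop n 1 [] := by
  obtain ⟨h1, h2⟩ := h
  rw [pfLoop, if_pos (by nlinarith)]
  apply pfLoop_mono
  rw [if_pos (mod_one_self n)]
  simp only [List.foldl, floordiv_one_self]
  unfold pfInner
  rw [if_pos h2]
  split <;> simp

theorem LargestPF_alt_of_pre (n : Int) (h : Pre_LargestPF n) : LargestPF_alt n = n := by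
  unfold LargestPF_alt
  have hn_mem := n_mem_pfLoop n h
  have hub : ∀ x ∈ pfLoop n 1 [], x ≤ n :=
    pfLoop_le n 1 [] (by omega) h.1 (by simp)
  obtain ⟨m, hm⟩ : ∃ m, PySem.List.max? (pfLoop n 1 []) (fun y => y) = some m := by
    cases hmx : PySem.List.max? (pfLoop n 1 []) (fun y => y) with
    | some m => exact ⟨m, rfl⟩
    | none =>
      rw [PySem.List.max?_eq_none_iff] at hmx
      rw [hmx] at hn_mem
      simp at hn_mem
  rw [hm, Option.getD_some]
  have h3 := PySem.List.max?_mem hm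
  have h4 := PySem.List.max?_isMax hm n hn_mem
  have h5 := hub m h3
  omega

-- ===== VERDICT =====
theorem LargestPF_spec : Claim_equal_LargestPF := by
  intro n _ hpre
  unfold Spec_LargestPF
  rw [LargestPF_of_pre n hpre, LargestPF_alt_of_pre n hpre]
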